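-- pv_equiv track=rewrite | github.com/sof-ter/s.terpylo_fb06_srom | labs/lab_4.py | multiply_in_basis
-- ===== SOURCE A (Python) =====
-- def shift_cyclic_left(num, k):
--     for x in range(k):
--         num += num[0]
--         num = num[1:]
--     return num
--
-- def multiply_matrix_in_basis(u, v):
--     u_length, v_length = len(u), len(v)
--     if type(v) != list:
--         v_length = 1
--     product_matrix = []
--     for i in range(v_length):
--         summary = 0
--         for j in range(u_length):
--             if v_length == 1:
--                 summary += int(u[j]) * int(v[j])
--             else:
--                 summary += int(u[j]) * int(v[i][j])
--         product_matrix.append(summary % 2)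
--     return product_matrix
--
-- def multiply_in_basis(u, v, matrix, dimensionality):
--     product = []
--     for i in range(dimensionality):
--         u_i, v_i = shift_cyclic_left(u, i), shift_cyclic_left(v, i)
--         first_product = multiply_matrix_in_basis(u_i, matrix)  # Ui * /\
--         second_product = multiply_matrix_in_basis(first_product, v_i)  # Ui * /\ * Vi
--         product.append(second_product[0])
--     return ''.join(str(x) for x in product)
-- ===== SOURCE B (Python) =====
-- def multiply_in_basis(u, v, matrix, dimensionality):
--     n_u, n_v = len(u), len(v)
--     bits = []
--     for i in range(dimensionality):
--         total = 0
--         for k in range(len(matrix)):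
--             row = matrix[k]
--             dot = 0
--             for j in range(n_u):
--                 dot += int(u[(j + i) % n_u]) * int(row[j])
--             total += int(v[(k + i) % n_v]) * dot
--         bits.append(str(total % 2))
--     return ''.join(bits)
-- ===== Notes on version B (the rewrite author's own statement) =====
-- stated objective: faster
-- what changed: B drops A's string-rebuilding cyclic-shift helper and the intermediate matrix-vector list: one fused triple loop reads u and v at rotated indices ((j+i) % len) and accumulates the double sum directly, taking mod 2 once per output bit.
import Mathlib
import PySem

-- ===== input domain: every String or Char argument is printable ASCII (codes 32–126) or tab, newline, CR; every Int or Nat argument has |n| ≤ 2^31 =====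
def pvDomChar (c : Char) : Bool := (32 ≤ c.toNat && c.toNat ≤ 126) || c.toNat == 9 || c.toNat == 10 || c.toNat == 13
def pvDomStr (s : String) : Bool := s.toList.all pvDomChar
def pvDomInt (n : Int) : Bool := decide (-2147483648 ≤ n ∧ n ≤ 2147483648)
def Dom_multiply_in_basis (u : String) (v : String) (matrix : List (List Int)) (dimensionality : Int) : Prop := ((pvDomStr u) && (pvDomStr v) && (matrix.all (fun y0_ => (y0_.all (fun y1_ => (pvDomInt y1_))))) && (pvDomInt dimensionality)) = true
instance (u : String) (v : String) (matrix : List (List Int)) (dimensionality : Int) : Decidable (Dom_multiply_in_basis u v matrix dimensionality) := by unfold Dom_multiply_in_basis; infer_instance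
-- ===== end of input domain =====

-- B replaces A's string-rebuilding cyclic-shift helper and intermediate matrix-vector list by one fused
-- triple loop reading the original strings at rotated indices (objective: faster — A rebuilds each shifted
-- string character by character).

-- int(c) for a one-character string c; the raising case (non-digit) is excluded by Pre_ and ported as 0
def pyIntChar (c : Char) : Int := (PySem.Int.ofChars? [c]).getD 0

-- ===== PORT A =====
def shift_cyclic_left (num : List Char) (k : Int) : List Char :=
  (PySem.List.pyRange 0 k 1).foldl
    (fun num _x =>
      -- num += num[0]; num = num[1:]   (num[0] raises IndexError on the empty string: excluded by Pre_)
      PySem.List.slice (num ++ [PySem.List.pyGetD num 0 ' ']) (some 1) none) num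

-- multiply_matrix_in_basis at its first call site: u a string, v the matrix (a list).
-- On the v_length == 1 branch Python computes int(v[j]) with v[j] a LIST: TypeError, excluded by Pre_; that int() is ported as 0.
def multiply_matrix_in_basis_sm (u : List Char) (matrix : List (List Int)) : List Int :=
  let u_length : Int := u.length
  let v_length : Int := matrix.length
  (PySem.List.pyRange 0 v_length 1).foldl
    (fun product_matrix i =>
      product_matrix ++ [PySem.Int.mod
        ((PySem.List.pyRange 0 u_length 1).foldl
          (fun summary j =>
            if v_length == 1 then
              summary + pyIntChar (PySem.List.pyGetD u j ' ') * 0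
            else
              summary + pyIntChar (PySem.List.pyGetD u j ' ') *
                PySem.List.pyGetD (PySem.List.pyGetD matrix i []) j 0)
          0) 2]) []

-- multiply_matrix_in_basis at its second call site: u the product list (ints), v a string, so v_length = 1
-- and the v_length == 1 branch always runs; int() on an int is the identity.
def multiply_matrix_in_basis_lv (u : List Int) (v : List Char) : List Int :=
  let u_length : Int := u.length
  let v_length : Int := 1
  (PySem.List.pyRange 0 v_length 1).foldl
    (fun product_matrix _i =>
      product_matrix ++ [PySem.Int.mod
        ((PySem.List.pyRange 0 u_length 1).foldl
          (fun summary j =>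
            summary + PySem.List.pyGetD u j 0 * pyIntChar (PySem.List.pyGetD v j ' ')) 0) 2]) []

def multiply_in_basis (u : String) (v : String) (matrix : List (List Int)) (dimensionality : Int) : String :=
  PySem.Str.join "" (((PySem.List.pyRange 0 dimensionality 1).foldl
    (fun product i =>
      let u_i := shift_cyclic_left u.toList i
      let v_i := shift_cyclic_left v.toList i
      let first_product := multiply_matrix_in_basis_sm u_i matrix
      let second_product := multiply_matrix_in_basis_lv first_product v_i
      product ++ [PySem.List.pyGetD second_product 0 0]) []).map PySem.Int.toStr)

-- ===== PORT B =====
def multiply_in_basis_alt (u : String) (v : String) (matrix : List (List Int)) (dimensionality : Int) : String :=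
  let cu := u.toList
  let cv := v.toList
  let n_u : Int := cu.length
  let n_v : Int := cv.length
  PySem.Str.join "" ((PySem.List.pyRange 0 dimensionality 1).foldl
    (fun bits i =>
      let total := (PySem.List.pyRange 0 (matrix.length : Int) 1).foldl
        (fun total k =>
          let row := PySem.List.pyGetD matrix k []
          let dot := (PySem.List.pyRange 0 n_u 1).foldl
            (fun dot j =>
              dot + pyIntChar (PySem.List.pyGetD cu (PySem.Int.mod (j + i) n_u) ' ') *
                PySem.List.pyGetD row j 0) 0
          total + pyIntChar (PySem.List.pyGetD cv (PySem.Int.mod (k + i) n_v) ' ') * dot) 0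
      bits ++ [PySem.Int.toStr (PySem.Int.mod total 2)]) [])

-- ===== PRECONDITION & SPEC =====
-- Pre_ excludes exactly the inputs where Python A raises (verified empirically): with dimensionality ≥ 1,
-- IndexError from shifting an empty string (d ≥ 2), TypeError from int(matrix[j]) on a list when
-- len(matrix) == 1 and u ≠ '', and — when matrix ≠ [] — ValueError/IndexError from int() on non-digit
-- characters of u or of the read positions of v, rows shorter than u, or v shorter than matrix.
def Pre_multiply_in_basis (u : String) (v : String) (matrix : List (List Int)) (dimensionality : Int) : Prop :=
  0 < dimensionality →
    ((2 ≤ dimensionality → u ≠ "" ∧ v ≠ "") ∧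
     (matrix.length = 1 → u = "") ∧
     (matrix ≠ [] →
       matrix.length ≤ v.toList.length ∧
       u.toList.all Char.isDigit = true ∧
       (∀ row ∈ matrix, u.toList.length ≤ row.length) ∧
       (∀ i < min dimensionality.toNat v.toList.length, ∀ k < matrix.length,
          ((v.toList.getD ((k + i) % v.toList.length) ' ').isDigit = true))))
instance (u : String) (v : String) (matrix : List (List Int)) (dimensionality : Int) : Decidable (Pre_multiply_in_basis u v matrix dimensionality) := by unfold Pre_multiply_in_basis; infer_instance

def pvWitness_multiply_in_basis : String × String × List (List Int) × Int := ("10", "110", [[1, 0], [0, 1]], 2)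

def Spec_multiply_in_basis (u : String) (v : String) (matrix : List (List Int)) (dimensionality : Int) (out : String) : Prop := out = multiply_in_basis_alt u v matrix dimensionality
instance (u : String) (v : String) (matrix : List (List Int)) (dimensionality : Int) (out : String) : Decidable (Spec_multiply_in_basis u v matrix dimensionality out) := by unfold Spec_multiply_in_basis; infer_instance

-- ===== CLAIM (what is proved, stated in full; the proofs are below) =====
def Claim_equal_multiply_in_basis : Prop := ∀ (u : String) (v : String) (matrix : List (List Int)) (dimensionality : Int), Dom_multiply_in_basis u v matrix dimensionality → Pre_multiply_in_basis u v matrix dimensionality → Spec_multiply_in_basis u v matrix dimensionality (multiply_in_basis u v matrix dimensionality)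

-- ===== LEMMAS AND PROOFS =====

-- one step of shift_cyclic_left
def pvStep (cs : List Char) : List Char :=
  PySem.List.slice (cs ++ [PySem.List.pyGetD cs 0 ' ']) (some 1) none

theorem pv_foldl_ignore {α β : Type} (f : α → α) (l : List β) (x : α) :
    l.foldl (fun a _ => f a) x = f^[l.length] x := by
  induction l generalizing x with
  | nil => rfl
  | cons b l ih => simpa [Function.iterate_succ_apply] using ih (f x)

theorem pv_shift_eq_rotate (cs : List Char) (i : Int) :
    shift_cyclic_left cs i = cs.rotate i.toNat := by
  have hstep : ∀ ds : List Char, pvStep ds = ds.rotate 1 := by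
    intro ds
    cases ds with
    | nil => simp [pvStep, PySem.List.slice_from_one]
    | cons a tl =>
      show PySem.List.slice ((a :: tl) ++ [PySem.List.pyGetD (a :: tl) 0 ' ']) (some 1) none = _
      rw [PySem.List.pyGetD_zero_cons, PySem.List.slice_from_one]
      simp [List.rotate_cons_succ]
  have hiter : ∀ t : Nat, pvStep^[t] cs = cs.rotate t := by
    intro t
    induction t with
    | zero => simp
    | succ t ih =>
      rw [Function.iterate_succ_apply', ih, hstep, List.rotate_rotate]
  unfold shift_cyclic_left
  rw [show (fun (num : List Char) (_x : Int) =>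
        PySem.List.slice (num ++ [PySem.List.pyGetD num 0 ' ']) (some 1) none)
      = (fun num _x => pvStep num) from rfl,
    pv_foldl_ignore, PySem.List.length_pyRange_one, hiter]
  norm_num

theorem pv_shift_length (cs : List Char) (i : Int) :
    (shift_cyclic_left cs i).length = cs.length := by
  rw [pv_shift_eq_rotate]; exact List.length_rotate ..

-- pyGetD on a rotated list equals pyGetD on the original at the Python-mod index
theorem pv_shift_getD (cs : List Char) (i k : Int) (d : Char)
    (hi : 0 ≤ i) (hk : 0 ≤ k) (hkl : k < (cs.length : Int)) :
    PySem.List.pyGetD (shift_cyclic_left cs i) k d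
      = PySem.List.pyGetD cs (PySem.Int.mod (k + i) (cs.length : Int)) d := by
  have hpos : (0 : Int) < (cs.length : Int) := lt_of_le_of_lt hk hkl
  rw [pv_shift_eq_rotate]
  rw [PySem.List.pyGetD_eq_getElem _ d hk (by simpa [List.length_rotate] using hkl)]
  rw [PySem.Int.mod_eq_emod_of_pos hpos]
  have h1 : (0 : Int) ≤ (k + i) % (cs.length : Int) := Int.emod_nonneg _ (by omega)
  have h2 : (k + i) % (cs.length : Int) < (cs.length : Int) := Int.emod_lt_of_pos _ hpos
  rw [PySem.List.pyGetD_eq_getElem _ d h1 (by omega)]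
  rw [List.getElem_rotate]
  have hki : k + i = ((k.toNat + i.toNat : Nat) : Int) := by omega
  congr 1
  rw [hki, ← Int.natCast_mod, Int.toNat_natCast]

-- mod-2 congruence of additive folds
theorem pv_foldl_add_mod2 (l : List Int) (f g : Int → Int) (a b : Int)
    (hab : a % 2 = b % 2) (h : ∀ x ∈ l, f x % 2 = g x % 2) :
    (l.foldl (fun s k => s + f k) a) % 2 = (l.foldl (fun s k => s + g k) b) % 2 := by
  induction l generalizing a b with
  | nil => simpa using hab
  | cons x l ih =>
    simp only [List.foldl_cons]
    exact ih _ _ (Int.ModEq.add hab (h x (by simp))) (fun y hy => h y (by simp [hy]))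

theorem pv_range01 : PySem.List.pyRange 0 1 1 = [0] := by decide

-- the per-iteration bit: A's two-stage product equals B's fused double sum
theorem pv_bit_eq (cu cv : List Char) (matrix : List (List Int)) (i : Int) (hi : 0 ≤ i)
    (h1 : matrix ≠ [] → matrix.length ≤ cv.length)
    (h2 : matrix.length = 1 → cu = []) :
    PySem.List.pyGetD
      (multiply_matrix_in_basis_lv
        (multiply_matrix_in_basis_sm (shift_cyclic_left cu i) matrix)
        (shift_cyclic_left cv i)) 0 0
    = PySem.Int.mod
        ((PySem.List.pyRange 0 (matrix.length : Int) 1).foldl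
          (fun total k =>
            total + pyIntChar (PySem.List.pyGetD cv (PySem.Int.mod (k + i) (cv.length : Int)) ' ') *
              ((PySem.List.pyRange 0 (cu.length : Int) 1).foldl
                (fun dot j =>
                  dot + pyIntChar (PySem.List.pyGetD cu (PySem.Int.mod (j + i) (cu.length : Int)) ' ') *
                    PySem.List.pyGetD (PySem.List.pyGetD matrix k []) j 0) 0)) 0) 2 := by
  by_cases hm0 : matrix = []
  · subst hm0
    simp [multiply_matrix_in_basis_sm, multiply_matrix_in_basis_lv,
      PySem.List.pyRange_one_eq_nil (le_refl (0 : Int)), pv_range01,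
      PySem.List.pyGetD_zero_cons]
  · have hm1 : 0 < matrix.length := List.length_pos_of_ne_nil hm0
    have hmv : matrix.length ≤ cv.length := h1 hm0
    have hUlen : ((shift_cyclic_left cu i).length : Int) = (cu.length : Int) := by
      rw [pv_shift_length]
    have hsm : multiply_matrix_in_basis_sm (shift_cyclic_left cu i) matrix
        = (PySem.List.pyRange 0 (matrix.length : Int) 1).map
            (fun k => PySem.Int.mod
              ((PySem.List.pyRange 0 ((shift_cyclic_left cu i).length : Int) 1).foldl
                (fun summary j =>
                  if ((matrix.length : Int) == 1) then
                    summary + pyIntChar (PySem.List.pyGetD (shift_cyclic_left cu i) j ' ') * 0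
                  else
                    summary + pyIntChar (PySem.List.pyGetD (shift_cyclic_left cu i) j ' ') *
                      PySem.List.pyGetD (PySem.List.pyGetD matrix k []) j 0) 0) 2) := by
      simp only [multiply_matrix_in_basis_sm]
      rw [PySem.List.foldl_append_singleton_eq_map]
      simp
    rw [hsm]
    simp only [multiply_matrix_in_basis_lv, pv_range01, List.foldl_cons, List.foldl_nil,
      List.nil_append, List.length_map, PySem.List.length_pyRange_one, sub_zero,
      Int.toNat_natCast, PySem.List.pyGetD_zero_cons]
    rw [PySem.Int.mod_eq_emod_of_pos (by norm_num : (0 : Int) < 2),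
        PySem.Int.mod_eq_emod_of_pos (by norm_num : (0 : Int) < 2)]
    refine pv_foldl_add_mod2 _ _ _ _ _ rfl ?_
    intro x hx
    obtain ⟨hx0, hxm⟩ := PySem.List.mem_pyRange_one.mp hx
    rw [PySem.List.pyGetD_map_pyRange_of_nonneg _ _ _ _ hx0 hxm]
    rw [pv_shift_getD cv i x ' ' hi hx0 (lt_of_lt_of_le hxm (by exact_mod_cast hmv))]
    by_cases hone : matrix.length = 1
    · have hcu : cu = [] := h2 hone
      simp [hcu, pv_shift_eq_rotate]
    · have hif : (((matrix.length : Int)) == 1) = false := by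
        simp only [beq_eq_false_iff_ne, ne_eq]
        exact_mod_cast hone
      simp only [hif, Bool.false_eq_true, if_false]
      have hinner :
          (PySem.List.pyRange 0 ((shift_cyclic_left cu i).length : Int) 1).foldl
            (fun summary j =>
              summary + pyIntChar (PySem.List.pyGetD (shift_cyclic_left cu i) j ' ') *
                PySem.List.pyGetD (PySem.List.pyGetD matrix x []) j 0) 0
          = (PySem.List.pyRange 0 (cu.length : Int) 1).foldl
              (fun dot j =>
                dot + pyIntChar (PySem.List.pyGetD cu (PySem.Int.mod (j + i) (cu.length : Int)) ' ') *
                  PySem.List.pyGetD (PySem.List.pyGetD matrix x []) j 0) 0 := by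
        rw [hUlen]
        refine PySem.List.foldl_congr_mem _ _ _ _ ?_
        intro acc j hj
        obtain ⟨hj0, hjn⟩ := PySem.List.mem_pyRange_one.mp hj
        rw [pv_shift_getD cu i j ' ' hi hj0 hjn]
      rw [hinner]
      rw [PySem.Int.mod_eq_emod_of_pos (by norm_num : (0 : Int) < 2)]
      have hme := Int.emod_emod_of_dvd
        ((PySem.List.pyRange 0 (cu.length : Int) 1).foldl
          (fun dot j =>
            dot + pyIntChar (PySem.List.pyGetD cu (PySem.Int.mod (j + i) (cu.length : Int)) ' ') *
              PySem.List.pyGetD (PySem.List.pyGetD matrix x []) j 0) 0)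
        (dvd_refl (2 : Int))
      simpa [mul_comm] using
        Int.ModEq.mul_right (pyIntChar (PySem.List.pyGetD cv (PySem.Int.mod (x + i) (cv.length : Int)) ' ')) hme

-- ===== VERDICT (by name: the statement is the Claim_ definition above) =====
theorem multiply_in_basis_spec : Claim_equal_multiply_in_basis := by
  intro u v matrix d _hdom hpre
  unfold Spec_multiply_in_basis
  simp only [multiply_in_basis, multiply_in_basis_alt]
  rw [PySem.List.foldl_append_singleton_eq_map, PySem.List.foldl_append_singleton_eq_map]
  simp only [List.nil_append, List.map_map]
  refine congrArg _ ?_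
  refine List.map_congr_left ?_
  intro i hi
  obtain ⟨hi0, hid⟩ := PySem.List.mem_pyRange_one.mp hi
  have hd : 0 < d := lt_of_le_of_lt hi0 hid
  obtain ⟨-, hp2, hp3⟩ := hpre hd
  simp only [Function.comp_apply]
  rw [pv_bit_eq u.toList v.toList matrix i hi0
    (fun h => (hp3 h).1) (fun h => by simp [hp2 h])]
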